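-- pv_equiv track=rewrite | github.com/mbarakovskiy/integral_maker | main.py | split_to_num_denom
-- ===== SOURCE A (Python) =====
-- def split_to_num_denom(expression):
--     brackets_count = 0
--     fract = ["", ""]
--     state = 0
--     for symbol in expression:
--         if symbol == "(":
--             brackets_count += 1
--             fract[state % 2] += symbol
--             continue
--         if symbol == ")":
--             brackets_count -= 1
--             fract[state % 2] += symbol
--             continue
--         if symbol == "/" and brackets_count == 0:
--             fract[state % 2] += "*"
--             state += 1
--             continue
--         fract[state % 2] += symbol
--     for state in range(2):
--         if len(fract[state]) > 0 and fract[state][len(fract[state]) - 1] == "*":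
--             fract[state] = fract[state][:-1]
--     return fract
-- ===== SOURCE B (Python) =====
-- def split_to_num_denom(expression):
--     # Divide-and-conquer: repeatedly locate the next top-level '/' and slice the
--     # expression into segments, then assemble each side from the alternating
--     # segments with a single join (stripping the star-cancelled side).
--     def top_slash(s):
--         depth = 0
--         for i, c in enumerate(s):
--             if c == "(":
--                 depth += 1
--             elif c == ")":
--                 depth -= 1
--             elif c == "/" and depth == 0:
--                 return i
--         return -1
--
--     segs = []
--     rest = expression
--     while True:
--         i = top_slash(rest)
--         if i < 0:
--             segs.append(rest)
--             break
--         segs.append(rest[:i])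
--         rest = rest[i + 1:]
--     num = [seg for j, seg in enumerate(segs) if j % 2 == 0]
--     den = [seg for j, seg in enumerate(segs) if j % 2 == 1]
--     fract = ["*".join(num), "*".join(den)]
--     last = (len(segs) - 1) % 2
--     if fract[last].endswith("*"):
--         fract[last] = fract[last][:-1]
--     return fract
-- ===== Notes on version B (the rewrite author's own statement) =====
-- stated objective: faster
-- what changed: A is a one-pass state machine that writes every character one by one into one of two output strings (repeated string concatenation into a list slot, which copies the string each time), alternating on a parity counter and patching a trailing star afterwards; B never accumulates characters: it repeatedly finds the next top-level slash (find-and-slice loop), slices the expression into segments, distributes the segments to numerator/denominator by position parity and builds each side with a single join, stripping only the side that holds the final segment.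
import Mathlib
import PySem

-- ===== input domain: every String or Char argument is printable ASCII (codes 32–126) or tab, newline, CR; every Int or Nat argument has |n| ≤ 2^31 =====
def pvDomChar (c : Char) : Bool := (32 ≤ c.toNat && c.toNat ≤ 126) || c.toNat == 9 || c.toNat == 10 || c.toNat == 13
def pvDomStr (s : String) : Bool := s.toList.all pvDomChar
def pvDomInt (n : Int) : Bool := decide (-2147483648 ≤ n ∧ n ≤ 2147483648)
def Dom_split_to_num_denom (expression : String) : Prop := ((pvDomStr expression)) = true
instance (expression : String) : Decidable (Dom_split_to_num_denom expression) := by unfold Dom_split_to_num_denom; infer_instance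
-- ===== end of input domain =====

-- B replaces A's one-pass two-string state machine by a find-and-slice loop: locate each
-- top-level '/', cut the expression into segments, join the alternating segments per side.

-- ===== PORT A =====
-- fract[state % 2] += c  (fract modelled as a pair of code-point lists)
def pvAddCur (st : Int) (f : List Char × List Char) (c : Char) : List Char × List Char :=
  if st % 2 = 0 then (f.1 ++ [c], f.2) else (f.1, f.2 ++ [c])

-- one iteration of A's for-loop; state = (brackets_count, state, fract)
def pvAStep (s : Int × Int × (List Char × List Char)) (c : Char) :
    Int × Int × (List Char × List Char) :=
  if c = '(' then (s.1 + 1, s.2.1, pvAddCur s.2.1 s.2.2 c)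
  else if c = ')' then (s.1 - 1, s.2.1, pvAddCur s.2.1 s.2.2 c)
  else if c = '/' ∧ s.1 = 0 then (s.1, s.2.1 + 1, pvAddCur s.2.1 s.2.2 '*')
  else (s.1, s.2.1, pvAddCur s.2.1 s.2.2 c)

-- A's final fix-up: `if len(f) > 0 and f[len(f)-1] == "*": f = f[:-1]`
def pvStrip1 (f : List Char) : List Char :=
  if f.getLast? = some '*' then f.dropLast else f

def split_to_num_denom (expression : String) : List String :=
  let s := expression.toList.foldl pvAStep (0, 0, ([], []))
  [String.ofList (pvStrip1 s.2.2.1), String.ofList (pvStrip1 s.2.2.2)]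

-- ===== PORT B =====
-- top_slash's for-loop over enumerate(s): depth tracking, return i on a depth-0 '/', else -1
def pvGo (d : Int) (i : Nat) : List Char → Int
  | [] => -1
  | c :: rest =>
    if c = '(' then pvGo (d + 1) (i + 1) rest
    else if c = ')' then pvGo (d - 1) (i + 1) rest
    else if c = '/' ∧ d = 0 then (i : Int)
    else pvGo d (i + 1) rest

def pvTopSlash (s : List Char) : Int := pvGo 0 0 s

-- the while-loop: segs.append(rest[:i]); rest = rest[i+1:]  (appends the final rest when i < 0)
def pvSegs (s : List Char) : List (List Char) :=
  if _h : pvTopSlash s < 0 then [s]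
  else
    PySem.List.slice s none (some (pvTopSlash s)) ::
      pvSegs (PySem.List.slice s (some (pvTopSlash s + 1)) none)
termination_by s.length
decreasing_by
  have h0 : 0 ≤ pvTopSlash s := by omega
  have hne : s ≠ [] := by
    intro he
    rw [he] at _h
    simp [pvTopSlash, pvGo] at _h
  rw [PySem.List.slice_from s (by omega)]
  have hpos : 0 < s.length := List.length_pos_of_ne_nil hne
  simp only [List.length_drop]
  omega

-- the two comprehensions `[seg for j, seg in enumerate(segs) if j % 2 == r]`, the joins,
-- `(len(segs)-1) % 2` and the endswith strip of that side; f[:-1] as dropLast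
def split_to_num_denom_alt (expression : String) : List String :=
  let segs := pvSegs expression.toList
  let num := ((PySem.List.enumerate segs 0).filter (fun p => PySem.Int.mod p.1 2 == 0)).map (·.2)
  let den := ((PySem.List.enumerate segs 0).filter (fun p => PySem.Int.mod p.1 2 == 1)).map (·.2)
  let f0 := PySem.Chars.join ['*'] num
  let f1 := PySem.Chars.join ['*'] den
  let last := PySem.Int.mod ((segs.length : Int) - 1) 2
  let fr := if last = 0
    then (if PySem.Chars.endswith f0 ['*'] then f0.dropLast else f0, f1)
    else (f0, if PySem.Chars.endswith f1 ['*'] then f1.dropLast else f1)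
  [String.ofList fr.1, String.ofList fr.2]

-- ===== PRECONDITION & SPEC =====
def Spec_split_to_num_denom (expression : String) (out : List String) : Prop := out = split_to_num_denom_alt expression
instance (expression : String) (out : List String) : Decidable (Spec_split_to_num_denom expression out) := by unfold Spec_split_to_num_denom; infer_instance

-- ===== CLAIM (what is proved, stated in full; the proofs are below) =====
def Claim_equal_split_to_num_denom : Prop := ∀ (expression : String), Dom_split_to_num_denom expression → Spec_split_to_num_denom expression (split_to_num_denom expression)

-- ===== LEMMAS AND PROOFS =====

def pvNet (s : List Char) : Int :=
  s.foldl (fun d c => if c = '(' then d + 1 else if c = ')' then d - 1 else d) 0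

theorem pvNet_shift (s : List Char) : ∀ (d : Int),
    s.foldl (fun d c => if c = '(' then d + 1 else if c = ')' then d - 1 else d) d = d + pvNet s := by
  induction s with
  | nil => intro d; simp [pvNet]
  | cons c t ih =>
    intro d
    rw [List.foldl_cons]
    rw [ih]
    have : pvNet (c :: t) = (if c = '(' then (1:Int) else if c = ')' then -1 else 0) + pvNet t := by
      unfold pvNet
      rw [List.foldl_cons, ih]
      split_ifs <;> simp [pvNet]
    rw [this]
    split_ifs <;> omega

theorem pvNet_cons (c : Char) (s : List Char) :
    pvNet (c :: s) = (if c = '(' then 1 else if c = ')' then -1 else 0) + pvNet s := by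
  unfold pvNet
  rw [List.foldl_cons, pvNet_shift]
  split_ifs <;> simp [pvNet]

def pvAdd (st : Int) (f : List Char × List Char) (xs : List Char) : List Char × List Char :=
  if st % 2 = 0 then (f.1 ++ xs, f.2) else (f.1, f.2 ++ xs)

def pvConsume (st : Int) (f : List Char × List Char) :
    List (List Char) → List Char × List Char
  | [] => f
  | [x] => pvAdd st f x
  | x :: y :: t => pvConsume (st + 1) (pvAdd st f (x ++ ['*'])) (y :: t)

mutual
def pvEvens : List (List Char) → List (List Char)
  | [] => []
  | x :: t => x :: pvOdds t
def pvOdds : List (List Char) → List (List Char)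
  | [] => []
  | _ :: t => pvEvens t
end

def pvJoinstar (ps : List (List Char)) : List Char :=
  (ps.map (· ++ ['*'])).flatten

def pvSide (st r : Int) (segs : List (List Char)) : List Char :=
  let sel := if st % 2 = r then pvEvens segs else pvOdds segs
  if (st + segs.length - 1) % 2 = r then PySem.Chars.join ['*'] sel else pvJoinstar sel

theorem pvGo_ge (s : List Char) : ∀ (d : Int) (i : Nat),
    pvGo d i s = -1 ∨ (i : Int) ≤ pvGo d i s := by
  induction s with
  | nil => intro d i; left; rfl
  | cons c rest ih =>
    intro d i
    unfold pvGo
    split_ifs with h1 h2 h3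
    · rcases ih (d + 1) (i + 1) with h | h
      · left; exact h
      · right; omega
    · rcases ih (d - 1) (i + 1) with h | h
      · left; exact h
      · right; omega
    · right; omega
    · rcases ih d (i + 1) with h | h
      · left; exact h
      · right; omega

theorem pvGo_spec (s : List Char) : ∀ (d : Int) (j : Nat) (k : Nat),
    pvGo d j s = (j : Int) + (k : Int) →
    k < s.length ∧ s[k]? = some '/' ∧ d + pvNet (s.take k) = 0 ∧ pvGo d j (s.take k) = -1 := by
  induction s with
  | nil => intro d j k h; simp [pvGo] at h; omega
  | cons c rest ih =>
    intro d j k h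
    by_cases h1 : c = '('
    · rw [show pvGo d j (c :: rest) = pvGo (d+1) (j+1) rest by simp [pvGo, h1]] at h
      have hk : 1 ≤ k := by
        rcases pvGo_ge rest (d+1) (j+1) with hg | hg <;> omega
      obtain ⟨k', rfl⟩ : ∃ k', k = k' + 1 := ⟨k - 1, by omega⟩
      have h' : pvGo (d+1) (j+1) rest = ((j+1 : Nat) : Int) + (k' : Int) := by push_cast; push_cast at h; omega
      obtain ⟨hl, hg, hn, hno⟩ := ih (d+1) (j+1) k' h'
      refine ⟨by simpa using Nat.succ_lt_succ hl, by simpa using hg, ?_, ?_⟩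
      · rw [List.take_succ_cons, pvNet_cons]; simp [h1]; omega
      · rw [List.take_succ_cons]; simp [pvGo, h1, hno]
    · by_cases h2 : c = ')'
      · rw [show pvGo d j (c :: rest) = pvGo (d-1) (j+1) rest by simp [pvGo, h1, h2]] at h
        have hk : 1 ≤ k := by
          rcases pvGo_ge rest (d-1) (j+1) with hg | hg <;> omega
        obtain ⟨k', rfl⟩ : ∃ k', k = k' + 1 := ⟨k - 1, by omega⟩
        have h' : pvGo (d-1) (j+1) rest = ((j+1 : Nat) : Int) + (k' : Int) := by push_cast; push_cast at h; omega
        obtain ⟨hl, hg, hn, hno⟩ := ih (d-1) (j+1) k' h'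
        refine ⟨by simpa using Nat.succ_lt_succ hl, by simpa using hg, ?_, ?_⟩
        · rw [List.take_succ_cons, pvNet_cons]; simp [h1, h2]; omega
        · rw [List.take_succ_cons]; simp [pvGo, h1, h2, hno]
      · by_cases h3 : c = '/' ∧ d = 0
        · rw [show pvGo d j (c :: rest) = (j : Int) by simp [pvGo, h1, h2, h3]] at h
          have hk : k = 0 := by omega
          subst hk
          refine ⟨by simp, by simp [h3.1], by simp [pvNet, h3.2], by simp [pvGo]⟩
        · rw [show pvGo d j (c :: rest) = pvGo d (j+1) rest by simp [pvGo, h1, h2, h3]] at h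
          have hk : 1 ≤ k := by
            rcases pvGo_ge rest d (j+1) with hg | hg <;> omega
          obtain ⟨k', rfl⟩ : ∃ k', k = k' + 1 := ⟨k - 1, by omega⟩
          have h' : pvGo d (j+1) rest = ((j+1 : Nat) : Int) + (k' : Int) := by push_cast; push_cast at h; omega
          obtain ⟨hl, hg, hn, hno⟩ := ih d (j+1) k' h'
          refine ⟨by simpa using Nat.succ_lt_succ hl, by simpa using hg, ?_, ?_⟩
          · rw [List.take_succ_cons, pvNet_cons]; simp [h1, h2]; omega
          · rw [List.take_succ_cons]; simp [pvGo, h1, h2, h3, hno]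

theorem pvAdd_addCur (st : Int) (f : List Char × List Char) (c : Char) (xs : List Char) :
    pvAdd st (pvAddCur st f c) xs = pvAdd st f (c :: xs) := by
  unfold pvAdd pvAddCur; split_ifs <;> simp

theorem pvAdd_nil (st : Int) (f : List Char × List Char) : pvAdd st f [] = f := by
  unfold pvAdd; split_ifs <;> simp

theorem pvFoldA_noCut (s : List Char) : ∀ (d : Int) (j : Nat) (st : Int)
    (f : List Char × List Char), pvGo d j s = -1 →
    List.foldl pvAStep (d, st, f) s = (d + pvNet s, st, pvAdd st f s) := by
  induction s with
  | nil => intro d j st f _; simp [pvNet, pvAdd_nil]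
  | cons c rest ih =>
    intro d j st f h
    rw [List.foldl_cons, pvNet_cons]
    by_cases h1 : c = '('
    · rw [show pvAStep (d, st, f) c = (d + 1, st, pvAddCur st f c) by simp [pvAStep, h1]]
      rw [ih (d+1) (j+1) st _ (by simpa [pvGo, h1] using h)]
      rw [pvAdd_addCur]
      simp [h1]; omega
    · by_cases h2 : c = ')'
      · rw [show pvAStep (d, st, f) c = (d - 1, st, pvAddCur st f c) by simp [pvAStep, h1, h2]]
        rw [ih (d-1) (j+1) st _ (by simpa [pvGo, h1, h2] using h)]
        rw [pvAdd_addCur]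
        simp [h1, h2]; omega
      · have h3 : ¬ (c = '/' ∧ d = 0) := by
          intro hc
          rw [show pvGo d j (c :: rest) = (j : Int) by simp [pvGo, h1, h2, hc]] at h
          omega
        rw [show pvAStep (d, st, f) c = (d, st, pvAddCur st f c) by simp [pvAStep, h1, h2, h3]]
        rw [ih d (j+1) st _ (by simpa [pvGo, h1, h2, h3] using h)]
        rw [pvAdd_addCur]
        simp [h1, h2]

theorem pvSegs_ne_nil (s : List Char) : pvSegs s ≠ [] := by
  rw [pvSegs.eq_def]
  split_ifs <;> simp

theorem pvAdd_append (st : Int) (f : List Char × List Char) (xs ys : List Char) :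
    pvAdd st (pvAdd st f xs) ys = pvAdd st f (xs ++ ys) := by
  unfold pvAdd; split_ifs <;> simp

theorem pvAddCur_eq (st : Int) (f : List Char × List Char) (c : Char) :
    pvAddCur st f c = pvAdd st f [c] := rfl

theorem pvMain (s : List Char) : ∀ (st : Int) (f : List Char × List Char),
    (List.foldl pvAStep (0, st, f) s).2.2 = pvConsume st f (pvSegs s) := by
  induction s using pvSegs.induct with
  | case1 s h =>
    intro st f
    rw [pvSegs.eq_def, dif_pos h]
    have hno : pvGo 0 0 s = -1 := by
      rcases pvGo_ge s 0 0 with hg | hg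
      · exact hg
      · exact absurd h (by simp [pvTopSlash]; omega)
    rw [pvFoldA_noCut s 0 0 st f hno]
    rfl
  | case2 s h ih =>
    intro st f
    have h0 : 0 ≤ pvTopSlash s := by omega
    set k : Nat := (pvTopSlash s).toNat with hk
    have hik : pvTopSlash s = (k : Int) := by omega
    have hsp := pvGo_spec s 0 0 k (by simpa [pvTopSlash] using hik.symm ▸ (rfl : pvGo 0 0 s = pvTopSlash s))
    obtain ⟨hlt, hget, hnet, hno⟩ := hsp
    have hgetE : s[k] = '/' := by
      have := List.getElem?_eq_getElem hlt
      rw [this] at hget; exact Option.some.inj hget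
    -- unfold pvSegs and normalize slices
    rw [pvSegs.eq_def, dif_neg h]
    rw [PySem.List.slice_to s h0, PySem.List.slice_from s (by omega), hik]
    have ht1 : ((k : Int)).toNat = k := by omega
    have ht2 : ((k : Int) + 1).toNat = k + 1 := by omega
    rw [ht1, ht2]
    -- decompose the fold of A along  s = take k ++ '/' :: drop (k+1)
    have hdec : s = s.take k ++ '/' :: s.drop (k + 1) := by
      conv_lhs => rw [← List.take_append_drop k s]
      rw [List.drop_eq_getElem_cons hlt, hgetE]
    conv_lhs => rw [hdec]
    rw [List.foldl_append, List.foldl_cons,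
        pvFoldA_noCut (s.take k) 0 0 st f hno]
    have hz : (0 : Int) + pvNet (s.take k) = 0 := hnet
    rw [hz]
    have hstep : pvAStep (0, st, pvAdd st f (s.take k)) '/' =
        (0, st + 1, pvAdd st f (s.take k ++ ['*'])) := by
      simp [pvAStep, pvAddCur_eq, pvAdd_append]
    rw [hstep]
    rw [PySem.List.slice_from s (by omega), hik, ht2] at ih
    rw [ih (st + 1) (pvAdd st f (s.take k ++ ['*']))]
    -- right side: pvConsume on cons with nonempty tail
    rcases he : pvSegs (s.drop (k + 1)) with _ | ⟨y, t⟩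
    · exact absurd he (pvSegs_ne_nil _)
    · rfl

theorem pvMod2 (a : Int) : PySem.Int.mod a 2 = a % 2 :=
  PySem.Int.mod_eq_emod_of_pos (by norm_num)

theorem pvEnumFilter (segs : List (List Char)) : ∀ (m r : Int), r = 0 ∨ r = 1 →
    ((PySem.List.enumerate segs m).filter (fun p => PySem.Int.mod p.1 2 == r)).map (·.2) =
      if PySem.Int.mod m 2 = r then pvEvens segs else pvOdds segs := by
  induction segs with
  | nil =>
    intro m r _
    simp only [PySem.List.enumerate_nil, List.filter_nil, List.map_nil]
    split_ifs <;> rfl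
  | cons x t ih =>
    intro m r hr
    rw [PySem.List.enumerate_cons, List.filter_cons]
    by_cases hm : PySem.Int.mod m 2 = r
    · rw [if_pos (by simpa using hm), List.map_cons, ih (m + 1) r hr]
      rw [pvMod2] at hm
      have hm1 : ¬ PySem.Int.mod (m + 1) 2 = r := by rw [pvMod2]; omega
      rw [if_neg hm1, if_pos (by rw [pvMod2]; omega)]
      rfl
    · rw [if_neg (by simpa using hm), ih (m + 1) r hr]
      rw [pvMod2] at hm
      have hm1 : PySem.Int.mod (m + 1) 2 = r := by rw [pvMod2]; omega
      rw [if_pos hm1, if_neg (by rw [pvMod2]; omega)]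
      rfl

theorem pvEvens_ne_nil (t : List (List Char)) (h : t ≠ []) : pvEvens t ≠ [] := by
  cases t with
  | nil => exact absurd rfl h
  | cons a l => simp [pvEvens]

theorem pvJoinstar_cons (x : List Char) (t : List (List Char)) :
    pvJoinstar (x :: t) = x ++ ['*'] ++ pvJoinstar t := by
  simp [pvJoinstar]

theorem pvSide_singleton (st r : Int) (x : List Char) :
    pvSide st r [x] = if st % 2 = r then x else [] := by
  simp only [pvSide, List.length_cons, List.length_nil]
  have hc : (st + ((0:Nat) + 1 : Nat) - 1) % 2 = st % 2 := by push_cast; ring_nf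
  simp only [hc]
  by_cases hst : st % 2 = r
  · rw [if_pos hst, if_pos hst, if_pos hst]
    rw [show pvEvens [x] = [x] from rfl, PySem.Chars.join_singleton]
  · rw [if_neg hst, if_neg hst, if_neg hst]
    rw [show pvOdds [x] = [] from rfl]
    rfl

theorem pvSide_cons_same (st r : Int) (x y : List Char) (t : List (List Char))
    (hr : r = 0 ∨ r = 1) (hst : st % 2 = r) :
    pvSide st r (x :: y :: t) = x ++ ['*'] ++ pvSide (st + 1) r (y :: t) := by
  unfold pvSide
  simp only [if_pos hst, if_neg (show ¬ (st + 1) % 2 = r by omega)]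
  have hsel : pvEvens (x :: y :: t) = x :: pvEvens t := rfl
  have hsel' : pvOdds (y :: t) = pvEvens t := rfl
  have hcond : (st + (x :: y :: t).length - 1) % 2 = ((st + 1) + (y :: t).length - 1) % 2 := by
    simp [List.length_cons]; ring_nf
  rw [hsel, hsel', ← hcond]
  by_cases hC : (st + (x :: y :: t).length - 1) % 2 = r
  · rw [if_pos hC, if_pos hC]
    have hlen : ¬ t = [] := by
      intro he
      subst he
      simp [List.length_cons] at hC
      omega
    rcases hev : pvEvens t with _ | ⟨z, w⟩
    · exact absurd hev (pvEvens_ne_nil t hlen)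
    · rw [PySem.Chars.join_cons_cons]
  · rw [if_neg hC, if_neg hC, pvJoinstar_cons]

theorem pvSide_cons_diff (st r : Int) (x y : List Char) (t : List (List Char))
    (hr : r = 0 ∨ r = 1) (hst : ¬ st % 2 = r) :
    pvSide st r (x :: y :: t) = pvSide (st + 1) r (y :: t) := by
  unfold pvSide
  simp only [if_neg hst, if_pos (show (st + 1) % 2 = r by omega)]
  have hsel : pvOdds (x :: y :: t) = pvEvens (y :: t) := rfl
  have hcond : (st + (x :: y :: t).length - 1) % 2 = ((st + 1) + (y :: t).length - 1) % 2 := by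
    simp [List.length_cons]; ring_nf
  rw [hsel, ← hcond]

theorem pvConsume_spec (segs : List (List Char)) : ∀ (st : Int) (f : List Char × List Char),
    segs ≠ [] →
    pvConsume st f segs = (f.1 ++ pvSide st 0 segs, f.2 ++ pvSide st 1 segs) := by
  induction segs with
  | nil => intro st f h; exact absurd rfl h
  | cons x t ih =>
    intro st f _
    cases t with
    | nil =>
      show pvAdd st f x = _
      rw [pvSide_singleton st 0 x, pvSide_singleton st 1 x]
      unfold pvAdd
      by_cases hst : st % 2 = 0
      · rw [if_pos hst, if_pos hst, if_neg (show ¬ st % 2 = 1 by omega)]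
        simp
      · rw [if_neg hst, if_neg hst, if_pos (show st % 2 = 1 by omega)]
        simp
    | cons y t' =>
      show pvConsume (st + 1) (pvAdd st f (x ++ ['*'])) (y :: t') = _
      rw [ih (st + 1) (pvAdd st f (x ++ ['*'])) (by simp)]
      by_cases hst : st % 2 = 0
      · rw [pvAdd, if_pos hst]
        rw [pvSide_cons_same st 0 x y t' (Or.inl rfl) hst,
            pvSide_cons_diff st 1 x y t' (Or.inr rfl) (by omega)]
        simp
      · rw [pvAdd, if_neg hst]
        rw [pvSide_cons_same st 1 x y t' (Or.inr rfl) (by omega),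
            pvSide_cons_diff st 0 x y t' (Or.inl rfl) hst]
        simp

theorem pvJoinstar_eq (ps : List (List Char)) (h : ps ≠ []) :
    pvJoinstar ps = PySem.Chars.join ['*'] ps ++ ['*'] := by
  induction ps with
  | nil => exact absurd rfl h
  | cons a t ih =>
    cases t with
    | nil => simp [pvJoinstar, PySem.Chars.join_singleton]
    | cons b r =>
      rw [PySem.Chars.join_cons_cons, pvJoinstar_cons, ih (by simp)]
      simp

theorem pvEndswith_star (f : List Char) :
    (if PySem.Chars.endswith f ['*'] then f.dropLast else f) = pvStrip1 f := by
  have h : PySem.Chars.endswith f ['*'] = true ↔ f.getLast? = some '*' := by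
    simp [PySem.Chars.endswith, List.isSuffixOf_iff_suffix]
    constructor
    · rintro ⟨t, rfl⟩; simp
    · intro hl
      rcases List.eq_nil_or_concat f with rfl | ⟨t, a, rfl⟩
      · simp at hl
      · simp at hl
        exact ⟨t, by simp [hl]⟩
  unfold pvStrip1
  by_cases hc : f.getLast? = some '*'
  · rw [if_pos (h.mpr hc), if_pos hc]
  · rw [if_neg (fun he => hc (h.mp he)), if_neg hc]

theorem pvStrip1_joinstar (ps : List (List Char)) :
    pvStrip1 (pvJoinstar ps) = PySem.Chars.join ['*'] ps := by
  cases ps with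
  | nil => simp [pvJoinstar, pvStrip1, PySem.Chars.join_nil]
  | cons a t =>
    rw [pvJoinstar_eq (a :: t) (by simp)]
    unfold pvStrip1
    rw [if_pos (by simp)]
    simp

theorem pvPortsAgree (expression : String) :
    split_to_num_denom expression = split_to_num_denom_alt expression := by
  unfold split_to_num_denom split_to_num_denom_alt
  simp only []
  set l := expression.toList
  set segs := pvSegs l with hsegs
  have hne : segs ≠ [] := pvSegs_ne_nil l
  have hnum := pvEnumFilter segs 0 0 (Or.inl rfl)
  have hden := pvEnumFilter segs 0 1 (Or.inr rfl)
  rw [if_pos (by rw [pvMod2]; norm_num)] at hnum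
  rw [if_neg (by rw [pvMod2]; norm_num)] at hden
  rw [hnum, hden]
  have hacc : (List.foldl pvAStep (0, 0, ([], [])) l).2.2 =
      (pvSide 0 0 segs, pvSide 0 1 segs) := by
    rw [pvMain l 0 ([], []), pvConsume_spec segs 0 ([], []) hne]
    simp
  rw [hacc]
  have hlenpos : 0 < segs.length := List.length_pos_of_ne_nil hne
  have hlast : PySem.Int.mod ((segs.length : Int) - 1) 2 = ((0 : Int) + segs.length - 1) % 2 := by
    rw [pvMod2]; ring_nf
  by_cases hl : ((0 : Int) + segs.length - 1) % 2 = 0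
  · rw [if_pos (by rw [hlast]; exact hl)]
    have hs0 : pvSide 0 0 segs = PySem.Chars.join ['*'] (pvEvens segs) := by
      unfold pvSide
      rw [if_pos hl]
      norm_num
    have hs1 : pvSide 0 1 segs = pvJoinstar (pvOdds segs) := by
      unfold pvSide
      rw [if_neg (by omega)]
      norm_num
    rw [hs0, hs1, pvEndswith_star]
    simp only [pvStrip1_joinstar]
  · rw [if_neg (by rw [hlast]; exact hl)]
    have hl1 : ((0 : Int) + segs.length - 1) % 2 = 1 := by omega
    have hs0 : pvSide 0 0 segs = pvJoinstar (pvEvens segs) := by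
      unfold pvSide
      rw [if_neg hl]
      norm_num
    have hs1 : pvSide 0 1 segs = PySem.Chars.join ['*'] (pvOdds segs) := by
      unfold pvSide
      rw [if_pos hl1]
      norm_num
    rw [hs0, hs1, pvEndswith_star]
    simp only [pvStrip1_joinstar]

-- ===== VERDICT (by name: the statement is the Claim_ definition above) =====
theorem split_to_num_denom_spec : Claim_equal_split_to_num_denom := by
  intro expression _
  exact pvPortsAgree expression
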